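-- pv_equiv track=rewrite | github.com/pierfonda/AdventOfCode | 2016/day_11/day_11.py | floor_to_string
-- ===== SOURCE A (Python) =====
-- namelen=3
--
-- def floor_to_string(s,e):
--     st=''
--     for a in range(len(s)):
--         for b in range(len(s)):
--             M= { i[:namelen] for i in s[a] if i[-1]=='M'}
--             G= { i[:namelen] for i in s[b] if i[-1]=='G'}
--             st+=f"{[len(M&G)]}{a}{b}"
--     return st+'E:'+str(e)
-- ===== SOURCE B (Python) =====
-- namelen = 3
--
-- def floor_to_string(s, e):
--     # One pass over the floors builds each floor's M-prefix set and G-prefix set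
--     # once, instead of rebuilding both sets inside the quadratic pair loop.
--     Ms = []
--     Gs = []
--     for floor in s:
--         m = set()
--         g = set()
--         for item in floor:
--             if item[-1] == 'M':
--                 m.add(item[:namelen])
--             elif item[-1] == 'G':
--                 g.add(item[:namelen])
--         Ms.append(m)
--         Gs.append(g)
--     n = len(s)
--     parts = [f"[{len(Ms[a] & Gs[b])}]{a}{b}" for a in range(n) for b in range(n)]
--     return ''.join(parts) + 'E:' + str(e)
-- ===== Notes on version B (the rewrite author's own statement) =====
-- stated objective: faster
-- what changed: B builds each floor's M-prefix set and G-prefix set once in a single pass over the floors, then the quadratic pair loop only intersects the precomputed sets (A rebuilds both sets from scratch inside every inner iteration), and the output is assembled by joining a list of pieces instead of repeated string concatenation.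
import Mathlib
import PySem

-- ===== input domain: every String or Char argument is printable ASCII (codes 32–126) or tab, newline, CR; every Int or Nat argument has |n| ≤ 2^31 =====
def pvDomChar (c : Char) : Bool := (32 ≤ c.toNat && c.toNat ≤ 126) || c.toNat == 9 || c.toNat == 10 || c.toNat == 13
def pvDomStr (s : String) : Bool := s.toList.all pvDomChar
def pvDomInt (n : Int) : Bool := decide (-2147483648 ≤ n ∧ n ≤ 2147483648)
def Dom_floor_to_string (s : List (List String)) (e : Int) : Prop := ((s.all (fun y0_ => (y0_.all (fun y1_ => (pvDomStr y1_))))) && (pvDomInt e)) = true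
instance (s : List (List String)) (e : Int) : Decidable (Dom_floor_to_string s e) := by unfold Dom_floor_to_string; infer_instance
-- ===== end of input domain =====

-- B hoists the two per-floor prefix-set constructions out of A's quadratic pair loop
-- (one pass over the floors builds them once) and emits the pieces as a joined list;
-- same return value, measured faster.

-- ===== PORT A =====
def floor_to_string (s : List (List String)) (e : Int) : String :=
  let st : String :=
    (PySem.List.pyRange 0 (s.length : Int) 1).foldl (fun st a =>
      (PySem.List.pyRange 0 (s.length : Int) 1).foldl (fun st b =>
        let M : PySem.Set String := PySem.Set.ofList
          (((PySem.List.pyGetD s a []).filter (fun i => PySem.Str.pyGet? i (-1) == some 'M')).map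
            (fun i => PySem.Str.slice i none (some 3)))
        let G : PySem.Set String := PySem.Set.ofList
          (((PySem.List.pyGetD s b []).filter (fun i => PySem.Str.pyGet? i (-1) == some 'G')).map
            (fun i => PySem.Str.slice i none (some 3)))
        st ++ "[" ++ PySem.Int.toStr (PySem.Set.len (PySem.Set.inter M G)) ++ "]"
           ++ PySem.Int.toStr a ++ PySem.Int.toStr b) st) ""
  st ++ "E:" ++ PySem.Int.toStr e

-- ===== PORT B =====
def floor_to_string_alt (s : List (List String)) (e : Int) : String :=
  let msgs : List (PySem.Set String) × List (PySem.Set String) :=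
    s.foldl (fun (acc : List (PySem.Set String) × List (PySem.Set String)) floor =>
      let mg : PySem.Set String × PySem.Set String :=
        floor.foldl (fun (mg : PySem.Set String × PySem.Set String) item =>
          if PySem.Str.pyGet? item (-1) == some 'M' then
            (PySem.Set.add mg.1 (PySem.Str.slice item none (some 3)), mg.2)
          else if PySem.Str.pyGet? item (-1) == some 'G' then
            (mg.1, PySem.Set.add mg.2 (PySem.Str.slice item none (some 3)))
          else mg) (PySem.Set.empty, PySem.Set.empty)
      (acc.1 ++ [mg.1], acc.2 ++ [mg.2])) ([], [])
  let n : Int := (s.length : Int)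
  let parts : List String :=
    (PySem.List.pyRange 0 n 1).flatMap (fun a =>
      (PySem.List.pyRange 0 n 1).map (fun b =>
        "[" ++ PySem.Int.toStr (PySem.Set.len (PySem.Set.inter
            (PySem.List.pyGetD msgs.1 a PySem.Set.empty)
            (PySem.List.pyGetD msgs.2 b PySem.Set.empty))) ++ "]"
          ++ PySem.Int.toStr a ++ PySem.Int.toStr b))
  PySem.Str.join "" parts ++ "E:" ++ PySem.Int.toStr e

-- ===== PRECONDITION & SPEC =====
-- Pre_ excludes inputs where some floor contains the empty string: there Python A
-- raises IndexError on i[-1] (so does B), and nothing else is excluded.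
def Pre_floor_to_string (s : List (List String)) (e : Int) : Prop :=
  (s.all (fun fl => fl.all (fun i => i != ""))) = true
instance (s : List (List String)) (e : Int) : Decidable (Pre_floor_to_string s e) := by unfold Pre_floor_to_string; infer_instance
def pvWitness_floor_to_string : List (List String) × Int := ([["abM", "abG", "cdM"], ["cdG"]], 5)

def Spec_floor_to_string (s : List (List String)) (e : Int) (out : String) : Prop := out = floor_to_string_alt s e
instance (s : List (List String)) (e : Int) (out : String) : Decidable (Spec_floor_to_string s e out) := by unfold Spec_floor_to_string; infer_instance

-- ===== CLAIM (what is proved, stated in full; the proofs are below) =====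
def Claim_equal_floor_to_string : Prop := ∀ (s : List (List String)) (e : Int), Dom_floor_to_string s e → Pre_floor_to_string s e → Spec_floor_to_string s e (floor_to_string s e)

-- ===== LEMMAS AND PROOFS =====

-- proof-side abbreviations for the two prefix sets of a floor and one emitted piece
def pvMset (fl : List String) : PySem.Set String :=
  PySem.Set.ofList ((fl.filter (fun i => PySem.Str.pyGet? i (-1) == some 'M')).map
    (fun i => PySem.Str.slice i none (some 3)))
def pvGset (fl : List String) : PySem.Set String :=
  PySem.Set.ofList ((fl.filter (fun i => PySem.Str.pyGet? i (-1) == some 'G')).map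
    (fun i => PySem.Str.slice i none (some 3)))
def pvPiece (s : List (List String)) (a b : Int) : String :=
  "[" ++ PySem.Int.toStr (PySem.Set.len (PySem.Set.inter (pvMset (PySem.List.pyGetD s a []))
      (pvGset (PySem.List.pyGetD s b [])))) ++ "]" ++ PySem.Int.toStr a ++ PySem.Int.toStr b
def pvCatL (ps : List String) : List Char := (ps.map String.toList).flatten

lemma pv_join_nil (ps : List (List Char)) : PySem.Chars.join [] ps = ps.flatten := by
  induction ps with
  | nil => simp [PySem.Chars.join_nil]
  | cons h t ih => cases t with
    | nil => simp [PySem.Chars.join, List.intercalate]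
    | cons h2 t2 => rw [PySem.Chars.join_cons_cons]; simp_all

lemma pv_inner_toList {α : Type} (f : α → String) (l : List α) (st : String) :
    (l.foldl (fun st x => st ++ f x) st).toList = st.toList ++ pvCatL (l.map f) := by
  induction l generalizing st with
  | nil => simp [pvCatL]
  | cons h t ih => simp [List.foldl_cons, ih, pvCatL]

lemma pv_nested_toList (f : Int → Int → String) (l1 l2 : List Int) (st : String) :
    (l1.foldl (fun st a => l2.foldl (fun st b => st ++ f a b) st) st).toList
      = st.toList ++ pvCatL (l1.flatMap (fun a => l2.map (f a))) := by
  induction l1 generalizing st with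
  | nil => simp [pvCatL]
  | cons h t ih =>
      rw [List.foldl_cons, ih, pv_inner_toList]
      simp [pvCatL]

lemma pv_fold_mg (fl : List String) (m g : PySem.Set String) :
    fl.foldl (fun (mg : PySem.Set String × PySem.Set String) item =>
        if PySem.Str.pyGet? item (-1) == some 'M' then
          (PySem.Set.add mg.1 (PySem.Str.slice item none (some 3)), mg.2)
        else if PySem.Str.pyGet? item (-1) == some 'G' then
          (mg.1, PySem.Set.add mg.2 (PySem.Str.slice item none (some 3)))
        else mg) (m, g)
      = (((fl.filter (fun i => PySem.Str.pyGet? i (-1) == some 'M')).map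
            (fun i => PySem.Str.slice i none (some 3))).foldl PySem.Set.add m,
         ((fl.filter (fun i => PySem.Str.pyGet? i (-1) == some 'G')).map
            (fun i => PySem.Str.slice i none (some 3))).foldl PySem.Set.add g) := by
  induction fl generalizing m g with
  | nil => simp
  | cons h t ih =>
      cases hval : PySem.List.pyGet? h.toList (-1) with
      | none => simp_all [List.foldl_cons]
      | some c =>
          by_cases hc : c = 'M'
          · subst hc; simp_all [List.foldl_cons]
          · by_cases hc2 : c = 'G'
            · subst hc2; simp_all [List.foldl_cons]
            · simp_all [List.foldl_cons]

lemma pv_fold_acc (s : List (List String)) (acc : List (PySem.Set String) × List (PySem.Set String)) :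
    s.foldl (fun acc fl => (acc.1 ++ [pvMset fl], acc.2 ++ [pvGset fl])) acc
      = (acc.1 ++ s.map pvMset, acc.2 ++ s.map pvGset) := by
  induction s generalizing acc with
  | nil => simp
  | cons h t ih => simp [List.foldl_cons, ih]

lemma pv_getD_map {β : Type} (f : List String → β) (s : List (List String)) (a : Int) (d : β)
    (h0 : 0 ≤ a) (h1 : a < (s.length : Int)) :
    PySem.List.pyGetD (s.map f) a d = f (PySem.List.pyGetD s a []) := by
  have h1' : a < ((s.map f).length : Int) := by simpa using h1
  rw [PySem.List.pyGetD_eq_getElem (s.map f) d h0 h1',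
      PySem.List.pyGetD_eq_getElem s ([] : List String) h0 h1]
  simp

lemma pv_A_toList (s : List (List String)) (e : Int) :
    (floor_to_string s e).toList
      = pvCatL ((PySem.List.pyRange 0 (s.length : Int) 1).flatMap (fun a =>
          (PySem.List.pyRange 0 (s.length : Int) 1).map (fun b => pvPiece s a b)))
        ++ ("E:" ++ PySem.Int.toStr e).toList := by
  have h : (fun (st : String) a =>
      (PySem.List.pyRange 0 (s.length : Int) 1).foldl (fun st b =>
        let M : PySem.Set String := PySem.Set.ofList
          (((PySem.List.pyGetD s a []).filter (fun i => PySem.Str.pyGet? i (-1) == some 'M')).map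
            (fun i => PySem.Str.slice i none (some 3)))
        let G : PySem.Set String := PySem.Set.ofList
          (((PySem.List.pyGetD s b []).filter (fun i => PySem.Str.pyGet? i (-1) == some 'G')).map
            (fun i => PySem.Str.slice i none (some 3)))
        st ++ "[" ++ PySem.Int.toStr (PySem.Set.len (PySem.Set.inter M G)) ++ "]"
           ++ PySem.Int.toStr a ++ PySem.Int.toStr b) st)
      = (fun (st : String) a => (PySem.List.pyRange 0 (s.length : Int) 1).foldl
          (fun st b => st ++ pvPiece s a b) st) := by
    funext st a
    have h2 : (fun (st : String) b =>
        let M : PySem.Set String := PySem.Set.ofList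
          (((PySem.List.pyGetD s a []).filter (fun i => PySem.Str.pyGet? i (-1) == some 'M')).map
            (fun i => PySem.Str.slice i none (some 3)))
        let G : PySem.Set String := PySem.Set.ofList
          (((PySem.List.pyGetD s b []).filter (fun i => PySem.Str.pyGet? i (-1) == some 'G')).map
            (fun i => PySem.Str.slice i none (some 3)))
        st ++ "[" ++ PySem.Int.toStr (PySem.Set.len (PySem.Set.inter M G)) ++ "]"
           ++ PySem.Int.toStr a ++ PySem.Int.toStr b)
        = (fun (st : String) b => st ++ pvPiece s a b) := by
      funext st b
      simp only [pvPiece, pvMset, pvGset]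
      apply String.toList_inj.mp
      simp
    rw [h2]
  simp only [floor_to_string]
  rw [h, String.toList_append, String.toList_append, pv_nested_toList]
  simp

lemma pv_B_toList (s : List (List String)) (e : Int) :
    (floor_to_string_alt s e).toList
      = pvCatL ((PySem.List.pyRange 0 (s.length : Int) 1).flatMap (fun a =>
          (PySem.List.pyRange 0 (s.length : Int) 1).map (fun b => pvPiece s a b)))
        ++ ("E:" ++ PySem.Int.toStr e).toList := by
  have hstep : (fun (acc : List (PySem.Set String) × List (PySem.Set String)) floor =>
      let mg : PySem.Set String × PySem.Set String :=
        floor.foldl (fun (mg : PySem.Set String × PySem.Set String) item =>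
          if PySem.Str.pyGet? item (-1) == some 'M' then
            (PySem.Set.add mg.1 (PySem.Str.slice item none (some 3)), mg.2)
          else if PySem.Str.pyGet? item (-1) == some 'G' then
            (mg.1, PySem.Set.add mg.2 (PySem.Str.slice item none (some 3)))
          else mg) (PySem.Set.empty, PySem.Set.empty)
      (acc.1 ++ [mg.1], acc.2 ++ [mg.2]))
      = (fun acc fl => (acc.1 ++ [pvMset fl], acc.2 ++ [pvGset fl])) := by
    funext acc fl
    simp only [pv_fold_mg, pvMset, pvGset, PySem.Set.ofList_eq_foldl, PySem.Set.empty]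
  simp only [floor_to_string_alt]
  rw [hstep, pv_fold_acc]
  have hparts : ∀ a ∈ PySem.List.pyRange 0 (s.length : Int) 1,
      ((PySem.List.pyRange 0 (s.length : Int) 1).map (fun b =>
        "[" ++ PySem.Int.toStr (PySem.Set.len (PySem.Set.inter
            (PySem.List.pyGetD (([] : List (PySem.Set String)) ++ s.map pvMset) a PySem.Set.empty)
            (PySem.List.pyGetD (([] : List (PySem.Set String)) ++ s.map pvGset) b PySem.Set.empty))) ++ "]"
          ++ PySem.Int.toStr a ++ PySem.Int.toStr b))
      = ((PySem.List.pyRange 0 (s.length : Int) 1).map (fun b => pvPiece s a b)) := by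
    intro a ha
    have ha' := (PySem.List.mem_pyRange_one).mp ha
    apply List.map_congr_left
    intro b hb
    have hb' := (PySem.List.mem_pyRange_one).mp hb
    rw [List.nil_append, List.nil_append,
        pv_getD_map pvMset s a PySem.Set.empty ha'.1 ha'.2,
        pv_getD_map pvGset s b PySem.Set.empty hb'.1 hb'.2]
    rfl
  rw [List.flatMap_congr hparts, String.toList_append, String.toList_append,
      PySem.Str.toList_join]
  simp [pvCatL, pv_join_nil]

-- ===== VERDICT (by name: the statement is the Claim_ definition above) =====
theorem floor_to_string_spec : Claim_equal_floor_to_string := by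
  intro s e _ _
  unfold Spec_floor_to_string
  apply String.toList_inj.mp
  rw [pv_A_toList, pv_B_toList]
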